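-- pv_equiv track=rewrite | github.com/AliTheBoss03/EV_3 | imageRecoginition.py | calculate_inner_safe_zone
-- ===== SOURCE A (Python) =====
-- def calculate_inner_safe_zone(obstacles, margin=50):  # Adjust margin for a smaller safe zone
--     if not obstacles:
--         return None
--     x_coords = [pos[0] for pos in obstacles]
--     y_coords = [pos[1] for pos in obstacles]
--     x1, y1 = min(x_coords) + margin, min(y_coords) + margin
--     x2, y2 = max(x_coords) - margin, max(y_coords) - margin
--     return (x1, y1, x2, y2)
-- ===== SOURCE B (Python) =====
-- def calculate_inner_safe_zone(obstacles, margin=50):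
--     if not obstacles:
--         return None
--     xs = sorted(pos[0] for pos in obstacles)
--     ys = sorted(pos[1] for pos in obstacles)
--     return (xs[0] + margin, ys[0] + margin, xs[-1] - margin, ys[-1] - margin)
-- ===== Notes on version B (the rewrite author's own statement) =====
-- stated objective: alternative
-- what changed: Replaced the four separate min/max scans with sort-then-pick: each coordinate list is sorted once and the extremes are read off as the first and last element.
import Mathlib
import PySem

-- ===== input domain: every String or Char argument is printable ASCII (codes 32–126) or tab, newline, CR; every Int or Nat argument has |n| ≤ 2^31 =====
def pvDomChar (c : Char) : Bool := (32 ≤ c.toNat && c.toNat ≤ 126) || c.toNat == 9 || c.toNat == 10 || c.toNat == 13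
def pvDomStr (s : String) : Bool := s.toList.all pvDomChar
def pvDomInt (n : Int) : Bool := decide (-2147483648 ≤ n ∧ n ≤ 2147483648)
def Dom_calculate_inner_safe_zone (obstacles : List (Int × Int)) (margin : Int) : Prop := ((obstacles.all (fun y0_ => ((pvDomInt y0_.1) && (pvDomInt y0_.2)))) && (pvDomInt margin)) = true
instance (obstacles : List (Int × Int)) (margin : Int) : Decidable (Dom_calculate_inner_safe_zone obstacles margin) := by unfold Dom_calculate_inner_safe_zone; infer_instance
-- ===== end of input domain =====

-- ===== PORT A =====
-- B computes each extreme by sorting the coordinate list once and reading off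
-- its first and last element, instead of A's four min/max scans; same value everywhere.
def calculate_inner_safe_zone (obstacles : List (Int × Int)) (margin : Int) : Option (Int × Int × Int × Int) :=
  if obstacles = [] then none
  else
    let x_coords := obstacles.map (fun pos => pos.1)
    let y_coords := obstacles.map (fun pos => pos.2)
    match PySem.List.min? x_coords (fun x => x), PySem.List.min? y_coords (fun x => x),
          PySem.List.max? x_coords (fun x => x), PySem.List.max? y_coords (fun x => x) with
    | some mx, some my, some Mx, some My => some (mx + margin, my + margin, Mx - margin, My - margin)
    | _, _, _, _ => none

-- ===== PORT B =====
def calculate_inner_safe_zone_alt (obstacles : List (Int × Int)) (margin : Int) : Option (Int × Int × Int × Int) :=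
  if obstacles = [] then none
  else
    let xs := PySem.List.sorted (obstacles.map (fun pos => pos.1)) (fun x => x) false
    let ys := PySem.List.sorted (obstacles.map (fun pos => pos.2)) (fun x => x) false
    -- xs[0] / xs[-1] on the nonempty sorted lists, via head?/getLast? (= pyGet? 0 / pyGet? (-1))
    match xs.head? with
    | none => none
    | some a =>
      match xs.getLast? with
      | none => none
      | some c =>
        match ys.head? with
        | none => none
        | some b =>
          match ys.getLast? with
          | none => none
          | some d => some (a + margin, b + margin, c - margin, d - margin)

-- ===== PRECONDITION & SPEC =====
def Spec_calculate_inner_safe_zone (obstacles : List (Int × Int)) (margin : Int) (out : Option (Int × Int × Int × Int)) : Prop := out = calculate_inner_safe_zone_alt obstacles margin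
instance (obstacles : List (Int × Int)) (margin : Int) (out : Option (Int × Int × Int × Int)) : Decidable (Spec_calculate_inner_safe_zone obstacles margin out) := by unfold Spec_calculate_inner_safe_zone; infer_instance

-- ===== CLAIM =====
def Claim_equal_calculate_inner_safe_zone : Prop := ∀ (obstacles : List (Int × Int)) (margin : Int), Dom_calculate_inner_safe_zone obstacles margin → Spec_calculate_inner_safe_zone obstacles margin (calculate_inner_safe_zone obstacles margin)

-- ===== LEMMAS AND PROOFS =====

theorem pairwise_le_getLast (l : List Int) :
    l.Pairwise (· ≤ ·) → ∀ y ∈ l, ∀ g, l.getLast? = some g → y ≤ g := by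
  induction l with
  | nil => intro _ y hy; simp at hy
  | cons a t ih =>
    intro h y hy g hg
    rw [List.pairwise_cons] at h
    rw [List.mem_cons] at hy
    cases t with
    | nil =>
      simp at hg
      rcases hy with rfl | hy
      · omega
      · simp at hy
    | cons b t' =>
      rw [List.getLast?_cons_cons] at hg
      rcases hy with rfl | hy
      · exact h.1 g (List.mem_of_getLast? hg)
      · exact ih h.2 y hy g hg

theorem sorted_head?_eq_min? (l : List Int) (hl : l ≠ []) :
    (PySem.List.sorted l (fun x => x) false).head? = PySem.List.min? l (fun x => x) := by
  have hs : PySem.List.sorted l (fun x => x) false ≠ [] := by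
    intro h; exact hl ((PySem.List.sorted_eq_nil_iff _ _ _).mp h)
  obtain ⟨m, t, heq⟩ := List.exists_cons_of_ne_nil hs
  obtain ⟨mn, hmn⟩ : ∃ mn, PySem.List.min? l (fun x => x) = some mn := by
    cases h : PySem.List.min? l (fun x => x) with
    | none => exact absurd ((PySem.List.min?_eq_none_iff _ _).mp h) hl
    | some v => exact ⟨v, rfl⟩
  rw [heq, hmn]
  have hm_mem : m ∈ l := (PySem.List.mem_sorted _ _ _ _).mp (heq ▸ List.mem_cons_self)
  have hmn_mem : mn ∈ l := PySem.List.min?_mem hmn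
  have h1 : mn ≤ m := PySem.List.min?_isMin hmn m hm_mem
  have h2 : m ≤ mn := PySem.List.key_head_sorted_le _ _ heq mn hmn_mem
  simp [le_antisymm h2 h1]

theorem sorted_getLast?_eq_max? (l : List Int) (hl : l ≠ []) :
    (PySem.List.sorted l (fun x => x) false).getLast? = PySem.List.max? l (fun x => x) := by
  have hs : PySem.List.sorted l (fun x => x) false ≠ [] := by
    intro h; exact hl ((PySem.List.sorted_eq_nil_iff _ _ _).mp h)
  obtain ⟨g, hg⟩ : ∃ g, (PySem.List.sorted l (fun x => x) false).getLast? = some g :=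
    ⟨_, List.getLast?_eq_some_getLast hs⟩
  obtain ⟨mx, hmx⟩ : ∃ mx, PySem.List.max? l (fun x => x) = some mx := by
    cases h : PySem.List.max? l (fun x => x) with
    | none => exact absurd ((PySem.List.max?_eq_none_iff _ _).mp h) hl
    | some v => exact ⟨v, rfl⟩
  rw [hg, hmx]
  have hg_mem : g ∈ l := (PySem.List.mem_sorted _ _ _ _).mp (List.mem_of_getLast? hg)
  have hmx_mem : mx ∈ PySem.List.sorted l (fun x => x) false :=
    (PySem.List.mem_sorted _ _ _ _).mpr (PySem.List.max?_mem hmx)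
  have h1 : g ≤ mx := PySem.List.max?_isMax hmx g hg_mem
  have h2 : mx ≤ g :=
    pairwise_le_getLast _ (PySem.List.sorted_pairwise l (fun x => x)) mx hmx_mem g hg
  simp [le_antisymm h2 h1]

-- ===== VERDICT =====
theorem calculate_inner_safe_zone_spec : Claim_equal_calculate_inner_safe_zone := by
  intro obstacles margin _
  unfold Spec_calculate_inner_safe_zone calculate_inner_safe_zone calculate_inner_safe_zone_alt
  by_cases h : obstacles = []
  · simp [h]
  · have hx : obstacles.map (fun pos => pos.1) ≠ [] := by
      simpa using h
    have hy : obstacles.map (fun pos => pos.2) ≠ [] := by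
      simpa using h
    simp only [if_neg h,
      sorted_head?_eq_min? _ hx, sorted_getLast?_eq_max? _ hx,
      sorted_head?_eq_min? _ hy, sorted_getLast?_eq_max? _ hy]
    obtain ⟨mx, hmx⟩ : ∃ v, PySem.List.min? (obstacles.map (fun pos => pos.1)) (fun x => x) = some v := by
      cases hc : PySem.List.min? (obstacles.map (fun pos => pos.1)) (fun x => x) with
      | none => exact absurd ((PySem.List.min?_eq_none_iff _ _).mp hc) hx
      | some v => exact ⟨v, rfl⟩
    obtain ⟨my, hmy⟩ : ∃ v, PySem.List.min? (obstacles.map (fun pos => pos.2)) (fun x => x) = some v := by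
      cases hc : PySem.List.min? (obstacles.map (fun pos => pos.2)) (fun x => x) with
      | none => exact absurd ((PySem.List.min?_eq_none_iff _ _).mp hc) hy
      | some v => exact ⟨v, rfl⟩
    obtain ⟨Mx, hMx⟩ : ∃ v, PySem.List.max? (obstacles.map (fun pos => pos.1)) (fun x => x) = some v := by
      cases hc : PySem.List.max? (obstacles.map (fun pos => pos.1)) (fun x => x) with
      | none => exact absurd ((PySem.List.max?_eq_none_iff _ _).mp hc) hx
      | some v => exact ⟨v, rfl⟩
    obtain ⟨My, hMy⟩ : ∃ v, PySem.List.max? (obstacles.map (fun pos => pos.2)) (fun x => x) = some v := by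
      cases hc : PySem.List.max? (obstacles.map (fun pos => pos.2)) (fun x => x) with
      | none => exact absurd ((PySem.List.max?_eq_none_iff _ _).mp hc) hy
      | some v => exact ⟨v, rfl⟩
    simp [hmx, hmy, hMx, hMy]
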